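-- pv_equiv track=rewrite | github.com/rogertubogjr/scrapper | src/scheduler/booking_sitemap/sources.py | select_hotel_index
-- ===== SOURCE A (Python) =====
-- from typing import Dict, List, Optional
--
-- def select_hotel_index(sitemap_urls: List[str]) -> Optional[str]:
--     """Pick the Booking.com hotel sitemap index URL, prioritising NL locales."""
--     for candidate in sitemap_urls:
--         if "sitembk-hotel-nl" in candidate and "index" in candidate:
--             return candidate
--
--     for candidate in sitemap_urls:
--         if "sitembk-hotel" in candidate and "index" in candidate:
--             return candidate
--
--     return None
-- ===== SOURCE B (Python) =====
-- from typing import Dict, List, Optional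
--
-- def select_hotel_index(sitemap_urls: List[str]) -> Optional[str]:
--     """Single pass: return the first NL hotel index URL immediately, else the
--     first general hotel index URL kept as a fallback."""
--     fallback = None
--     for candidate in sitemap_urls:
--         if "sitembk-hotel-nl" in candidate and "index" in candidate:
--             return candidate
--         if fallback is None and "sitembk-hotel" in candidate and "index" in candidate:
--             fallback = candidate
--     return fallback
-- ===== Notes on version B (the rewrite author's own statement) =====
-- stated objective: simpler
-- what changed: replaces A's two full scans of the list by one single-pass loop that returns an NL match immediately and keeps the first general hotel-index match as a fallback
import Mathlib
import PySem

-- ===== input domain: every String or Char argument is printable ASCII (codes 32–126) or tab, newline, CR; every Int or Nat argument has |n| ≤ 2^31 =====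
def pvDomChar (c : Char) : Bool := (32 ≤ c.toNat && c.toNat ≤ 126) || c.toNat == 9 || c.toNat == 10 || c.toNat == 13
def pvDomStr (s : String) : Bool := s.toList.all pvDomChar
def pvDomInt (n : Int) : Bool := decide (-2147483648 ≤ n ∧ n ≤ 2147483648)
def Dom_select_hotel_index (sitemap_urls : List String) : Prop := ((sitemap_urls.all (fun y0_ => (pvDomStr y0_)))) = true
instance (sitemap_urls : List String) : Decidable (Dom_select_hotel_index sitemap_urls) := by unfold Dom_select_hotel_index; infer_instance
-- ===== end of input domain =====

-- B replaces A's two full scans by one single-pass loop with a fallback (objective: simpler).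


-- ===== PORT A =====
-- first loop of A: return first candidate containing both "sitembk-hotel-nl" and "index"
def pvFindNL : List String → Option String
  | [] => none
  | c :: rest =>
    if PySem.Str.isIn "sitembk-hotel-nl" c && PySem.Str.isIn "index" c then some c
    else pvFindNL rest

-- second loop of A: return first candidate containing both "sitembk-hotel" and "index"
def pvFindGen : List String → Option String
  | [] => none
  | c :: rest =>
    if PySem.Str.isIn "sitembk-hotel" c && PySem.Str.isIn "index" c then some c
    else pvFindGen rest

def select_hotel_index (sitemap_urls : List String) : Option String :=
  match pvFindNL sitemap_urls with
  | some c => some c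
  | none => pvFindGen sitemap_urls

-- ===== PORT B =====
-- the single loop of Source B, carrying the fallback variable
def pvLoopB : List String → Option String → Option String
  | [], fallback => fallback
  | c :: rest, fallback =>
    if PySem.Str.isIn "sitembk-hotel-nl" c && PySem.Str.isIn "index" c then some c
    else if fallback.isNone && (PySem.Str.isIn "sitembk-hotel" c && PySem.Str.isIn "index" c) then
      pvLoopB rest (some c)
    else pvLoopB rest fallback

def select_hotel_index_alt (sitemap_urls : List String) : Option String :=
  pvLoopB sitemap_urls none

-- ===== PRECONDITION & SPEC =====
def Spec_select_hotel_index (sitemap_urls : List String) (out : Option String) : Prop := out = select_hotel_index_alt sitemap_urls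
instance (sitemap_urls : List String) (out : Option String) : Decidable (Spec_select_hotel_index sitemap_urls out) := by unfold Spec_select_hotel_index; infer_instance

-- ===== CLAIM (what is proved, stated in full; the proofs are below) =====
def Claim_equal_select_hotel_index : Prop := ∀ (sitemap_urls : List String), Dom_select_hotel_index sitemap_urls → Spec_select_hotel_index sitemap_urls (select_hotel_index sitemap_urls)

-- ===== LEMMAS AND PROOFS =====

-- invariant of B's loop: an NL match wins; otherwise the fallback (if set) wins; otherwise the first general match
theorem pvLoopB_eq (urls : List String) (fb : Option String) :
    pvLoopB urls fb =
      match pvFindNL urls with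
      | some c => some c
      | none => match fb with
        | some f => some f
        | none => pvFindGen urls := by
  induction urls generalizing fb with
  | nil => cases fb <;> rfl
  | cons c rest ih =>
    rw [pvLoopB, pvFindNL]
    by_cases hnl : (PySem.Str.isIn "sitembk-hotel-nl" c && PySem.Str.isIn "index" c) = true
    · rw [if_pos hnl, if_pos hnl]
    · rw [if_neg hnl, if_neg hnl]
      by_cases h2 : (fb.isNone && (PySem.Str.isIn "sitembk-hotel" c && PySem.Str.isIn "index" c)) = true
      · rw [Bool.and_eq_true] at h2
        obtain ⟨hfb, hg⟩ := h2
        have hfb' : fb = none := by cases fb with | none => rfl | some f => exact Bool.noConfusion hfb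
        subst hfb'
        rw [if_pos (by rw [Bool.and_eq_true]; exact ⟨rfl, hg⟩), ih]
        cases h : pvFindNL rest with
        | some c' => rfl
        | none =>
          show some c = pvFindGen (c :: rest)
          conv_rhs => rw [pvFindGen]
          rw [if_pos hg]
      · rw [if_neg h2, ih]
        cases h : pvFindNL rest with
        | some c' => rfl
        | none =>
          cases fb with
          | some f => rfl
          | none =>
            have hg : ¬ (PySem.Str.isIn "sitembk-hotel" c && PySem.Str.isIn "index" c) = true := by
              intro hx
              exact h2 (by rw [hx]; rfl)
            show pvFindGen rest = pvFindGen (c :: rest)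
            conv_rhs => rw [pvFindGen]
            rw [if_neg hg]

-- ===== VERDICT (by name: the statement is the Claim_ definition above) =====
theorem select_hotel_index_spec : Claim_equal_select_hotel_index := by
  intro urls _
  unfold Spec_select_hotel_index select_hotel_index select_hotel_index_alt
  rw [pvLoopB_eq]
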